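-- pv_equiv track=rewrite | github.com/Wa/pqm-ai-quality-control | tabs/history/background.py | _build_header_candidate
-- ===== SOURCE A (Python) =====
-- from typing import Any, Callable, Dict, Iterable, Optional, Sequence
--
-- def _horizontal_fill(row: Sequence[str]) -> list[str]:
--     filled: list[str] = []
--     last = ""
--     for cell in row:
--         text = cell or ""
--         if not text and last:
--             filled.append(last)
--         else:
--             filled.append(text)
--             if text:
--                 last = text
--     return filled
--
-- def _build_header_candidate(rows: list[list[str]], indices: Sequence[int]) -> list[str]:
--     selected = []
--     for idx in indices:
--         if idx < len(rows):
--             selected.append(_horizontal_fill(rows[idx]))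
--     if not selected:
--         return []
--     width = max(len(row) for row in selected)
--     headers: list[str] = []
--     for col in range(width):
--         parts = []
--         for row in selected:
--             value = row[col] if col < len(row) else ""
--             if value:
--                 parts.append(value)
--         headers.append("/".join(parts).strip("/"))
--     return headers
-- ===== SOURCE B (Python) =====
-- def _horizontal_fill(row):
--     filled = []
--     last = ""
--     for cell in row:
--         text = cell or ""
--         if not text and last:
--             filled.append(last)
--         else:
--             filled.append(text)
--             if text:
--                 last = text
--     return filled
--
--
-- def _build_header_candidate(rows, indices):
--     # Column-peeling: instead of computing the max width and indexing each row
--     # with a bounds check, repeatedly strip off the first column of the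
--     # remaining rows until every row is exhausted.
--     selected = [_horizontal_fill(rows[i]) for i in indices if i < len(rows)]
--     headers = []
--     while any(selected):
--         column = [r[0] for r in selected if r]
--         headers.append("/".join(v for v in column if v).strip("/"))
--         selected = [r[1:] for r in selected]
--     return headers
-- ===== Notes on version B (the rewrite author's own statement) =====
-- stated objective: alternative
-- what changed: Replaces the width computation plus nested index-with-bounds-check column scan by structural column peeling: repeatedly take the heads of the remaining non-empty rows and drop the first column until all rows are exhausted.
import Mathlib
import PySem

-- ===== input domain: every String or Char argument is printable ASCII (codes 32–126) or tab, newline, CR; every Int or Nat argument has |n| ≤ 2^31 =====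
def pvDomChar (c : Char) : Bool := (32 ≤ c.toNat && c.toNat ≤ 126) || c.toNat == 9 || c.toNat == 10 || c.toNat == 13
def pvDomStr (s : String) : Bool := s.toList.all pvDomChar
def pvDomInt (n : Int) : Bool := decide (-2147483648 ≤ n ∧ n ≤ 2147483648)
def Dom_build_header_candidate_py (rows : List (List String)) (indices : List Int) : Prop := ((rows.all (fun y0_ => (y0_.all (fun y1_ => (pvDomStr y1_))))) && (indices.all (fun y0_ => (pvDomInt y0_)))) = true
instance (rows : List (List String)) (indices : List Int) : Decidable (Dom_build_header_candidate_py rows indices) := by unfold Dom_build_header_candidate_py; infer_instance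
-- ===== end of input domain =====

-- B replaces A's width computation + nested bounds-checked index scan by structural
-- column peeling (take heads of the remaining non-empty rows, drop the first column,
-- repeat); same cost, alternative decomposition.

-- ===== PORT A =====
-- _horizontal_fill, shared helper of both ports (B's Python keeps it verbatim).
-- `cell or ""` on str is the identity (ported as `cell`).
def pyHorizontalFill (row : List String) : List String :=
  (row.foldl (fun (st : List String × String) cell =>
      let text := cell
      if text == "" && st.2 != "" then (st.1 ++ [st.2], st.2)
      else (st.1 ++ [text], if text != "" then text else st.2))
    ([], "")).1

def build_header_candidate_py (rows : List (List String)) (indices : List Int) : List String :=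
  let selected := indices.foldl (fun acc idx =>
      if idx < (rows.length : Int) then
        acc ++ [pyHorizontalFill ((PySem.List.pyGet? rows idx).getD [])]
      else acc) []
  if selected.isEmpty then []
  else
    let width := (selected.map List.length).foldl max 0
    (List.range width).foldl (fun headers col =>
      let parts := selected.foldl (fun ps row =>
          let value := if col < row.length then row.getD col "" else ""
          if value != "" then ps ++ [value] else ps) []
      headers ++ [PySem.Str.stripChars (PySem.Str.join "/" parts) "/"]) []

-- ===== PORT B =====
-- termination helper for the peeling loop (cited by `decreasing_by`)
theorem pvSumLenDrop_le (sel : List (List String)) :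
    ((sel.map (List.drop 1)).map List.length).sum ≤ ((sel.map List.length)).sum := by
  induction sel with
  | nil => simp
  | cons r t ih => simp only [List.map_cons, List.sum_cons, List.length_drop]; omega

theorem pvSumLenDrop_lt (sel : List (List String))
    (h : sel.any (fun r => !r.isEmpty) = true) :
    ((sel.map (List.drop 1)).map List.length).sum < (sel.map List.length).sum := by
  induction sel with
  | nil => simp at h
  | cons r t ih =>
    simp only [List.any_cons, Bool.or_eq_true] at h
    simp only [List.map_cons, List.sum_cons, List.length_drop]
    rcases h with h | h
    · have hr : 0 < r.length := by
        cases r with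
        | nil => simp at h
        | cons a b => simp
      have := pvSumLenDrop_le t
      omega
    · have := ih h
      have : r.length - 1 ≤ r.length := by omega
      omega

def pyPeelColumns (selected : List (List String)) : List String :=
  if h : selected.any (fun r => !r.isEmpty) = true then
    let column := (selected.filter (fun r => !r.isEmpty)).map (fun r => r.headD "")
    PySem.Str.stripChars (PySem.Str.join "/" (column.filter (fun v => v != ""))) "/"
      :: pyPeelColumns (selected.map (List.drop 1))
  else []
termination_by (selected.map List.length).sum
decreasing_by simpa [Function.comp_def, List.drop_one] using pvSumLenDrop_lt selected h

def build_header_candidate_py_alt (rows : List (List String)) (indices : List Int) : List String :=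
  pyPeelColumns ((indices.filter (fun i => i < (rows.length : Int))).map
    (fun i => pyHorizontalFill ((PySem.List.pyGet? rows i).getD [])))

-- ===== PRECONDITION & SPEC =====
-- Pre_ excludes indices below -len(rows): there the Python A (and B) raises IndexError.
def Pre_build_header_candidate_py (rows : List (List String)) (indices : List Int) : Prop :=
  ∀ i ∈ indices, i < (rows.length : Int) → -(rows.length : Int) ≤ i
instance (rows : List (List String)) (indices : List Int) : Decidable (Pre_build_header_candidate_py rows indices) := by unfold Pre_build_header_candidate_py; infer_instance

def pvWitness_build_header_candidate_py : List (List String) × List Int := ([["a", "b"], ["c"]], [0, 1])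

def Spec_build_header_candidate_py (rows : List (List String)) (indices : List Int) (out : List String) : Prop := out = build_header_candidate_py_alt rows indices
instance (rows : List (List String)) (indices : List Int) (out : List String) : Decidable (Spec_build_header_candidate_py rows indices out) := by unfold Spec_build_header_candidate_py; infer_instance

-- ===== CLAIM (what is proved, stated in full; the proofs are below) =====
def Claim_equal_build_header_candidate_py : Prop := ∀ (rows : List (List String)) (indices : List Int), Dom_build_header_candidate_py rows indices → Pre_build_header_candidate_py rows indices → Spec_build_header_candidate_py rows indices (build_header_candidate_py rows indices)

-- ===== LEMMAS AND PROOFS =====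

-- the cell A reads at column `col` of a filled row
def pvValAt (col : Nat) (row : List String) : String :=
  if col < row.length then row.getD col "" else ""

-- the parts list A builds for column `col`
def pvColParts (col : Nat) (sel : List (List String)) : List String :=
  (sel.filter (fun r => pvValAt col r != "")).map (pvValAt col)

theorem pvValAt_succ (col : Nat) (row : List String) :
    pvValAt (col + 1) row = pvValAt col (row.drop 1) := by
  cases row with
  | nil => simp [pvValAt]
  | cons x xs => simp [pvValAt]

theorem pvColParts_succ (col : Nat) (sel : List (List String)) :
    pvColParts (col + 1) sel = pvColParts col (sel.map (List.drop 1)) := by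
  have hg : pvValAt (col + 1) = fun r => pvValAt col (List.drop 1 r) := funext (pvValAt_succ col)
  simp [pvColParts, hg, List.filter_map, List.map_map, Function.comp_def, List.drop_one]

theorem pvColParts_zero (sel : List (List String)) :
    pvColParts 0 sel =
      ((sel.filter (fun r => !r.isEmpty)).map (fun r => r.headD "")).filter (fun v => v != "") := by
  induction sel with
  | nil => simp [pvColParts]
  | cons r t ih =>
    cases r with
    | nil => simpa [pvColParts, pvValAt] using ih
    | cons x xs =>
      have hv : pvValAt 0 (x :: xs) = x := by simp [pvValAt]
      simp only [pvColParts] at ih ⊢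
      rw [List.filter_cons, hv]
      by_cases h : x = ""
      · subst h
        simp only [bne_self_eq_false, Bool.false_eq_true, if_false]
        rw [ih]
        simp
      · have hb : (x != "") = true := by simpa using h
        rw [if_pos hb, List.map_cons, hv, ih]
        simp [hb]

def pvMaxLen (sel : List (List String)) : Nat := (sel.map List.length).foldl max 0

theorem pvFoldlMaxInit (l : List Nat) (a : Nat) : l.foldl max a = max a (l.foldl max 0) := by
  induction l generalizing a with
  | nil => simp
  | cons x t ih =>
    simp only [List.foldl_cons, Nat.zero_max]
    rw [ih (max a x), ih x]
    omega

theorem pvMaxLen_cons (r : List String) (t : List (List String)) :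
    pvMaxLen (r :: t) = max r.length (pvMaxLen t) := by
  simp only [pvMaxLen, List.map_cons, List.foldl_cons]
  rw [pvFoldlMaxInit]
  omega

theorem pvMaxLen_zero_iff (sel : List (List String)) :
    pvMaxLen sel = 0 ↔ sel.any (fun r => !r.isEmpty) = false := by
  induction sel with
  | nil => simp [pvMaxLen]
  | cons r t ih =>
    rw [pvMaxLen_cons]
    simp only [List.any_cons, Bool.or_eq_false_iff]
    constructor
    · intro h
      have h1 : r.length = 0 := by omega
      have h2 : pvMaxLen t = 0 := by omega
      exact ⟨by simp [List.length_eq_zero_iff.mp h1], ih.mp h2⟩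
    · rintro ⟨h1, h2⟩
      have : r.length = 0 := by
        simp only [Bool.not_eq_false'] at h1
        simp [List.isEmpty_iff.mp h1]
      have := ih.mpr h2
      omega

theorem pvMaxLen_drop (sel : List (List String)) :
    pvMaxLen (sel.map (List.drop 1)) = pvMaxLen sel - 1 := by
  induction sel with
  | nil => simp [pvMaxLen]
  | cons r t ih =>
    simp only [List.map_cons]
    rw [pvMaxLen_cons, pvMaxLen_cons, ih, List.length_drop]
    omega

-- A's column-indexed pass equals B's column peeling, for any table.
set_option maxHeartbeats 1000000 in
theorem pvRangeMap_eq_peel (n : Nat) : ∀ sel : List (List String), pvMaxLen sel = n →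
    (List.range n).map
      (fun col => PySem.Str.stripChars (PySem.Str.join "/" (pvColParts col sel)) "/")
      = pyPeelColumns sel := by
  induction n with
  | zero =>
    intro sel h
    rw [pyPeelColumns.eq_def]
    simp [(pvMaxLen_zero_iff sel).mp h]
  | succ n ih =>
    intro sel h
    have hany : sel.any (fun r => !r.isEmpty) = true := by
      by_contra hc
      have := (pvMaxLen_zero_iff sel).mpr (by simpa using hc)
      omega
    have h' : pvMaxLen (sel.map (List.drop 1)) = n := by rw [pvMaxLen_drop, h]; omega
    rw [pyPeelColumns.eq_def, dif_pos hany]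
    simp only [List.range_succ_eq_map, List.map_cons, List.map_map]
    congr 1
    · rw [pvColParts_zero]
    · rw [← ih (sel.map (List.drop 1)) h']
      apply List.map_congr_left
      intro c _
      simp only [Function.comp_apply, Nat.succ_eq_add_one, pvColParts_succ]

-- ===== VERDICT (by name: the statement is the Claim_ definition above) =====
theorem build_header_candidate_py_spec : Claim_equal_build_header_candidate_py := by
  intro rows indices _ _
  unfold Spec_build_header_candidate_py build_header_candidate_py build_header_candidate_py_alt
  simp only []
  rw [PySem.List.foldl_append_ite (fun idx => idx < (rows.length : Int))
        (fun idx => pyHorizontalFill ((PySem.List.pyGet? rows idx).getD []))]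
  set sel := ((indices.filter (fun i => i < (rows.length : Int))).map
      (fun i => pyHorizontalFill ((PySem.List.pyGet? rows i).getD []))) with hsel
  by_cases hE : sel.isEmpty
  · rw [if_pos (by simpa using hE)]
    rw [pyPeelColumns.eq_def]
    have : sel = [] := by simpa [List.isEmpty_iff] using hE
    simp [this]
  · rw [if_neg (by simpa using hE)]
    rw [← pvRangeMap_eq_peel (pvMaxLen sel) sel rfl]
    rw [PySem.List.foldl_append_singleton_eq_map]
    simp only [List.nil_append, pvMaxLen]
    apply List.map_congr_left
    intro col _
    congr 1
    congr 1
    rw [PySem.List.foldl_append_if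
          (fun row : List String => (if col < row.length then row.getD col "" else "") != "")
          (fun row : List String => if col < row.length then row.getD col "" else "")]
    simp [pvColParts, pvValAt]
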